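-- pv_equiv track=rewrite | github.com/Ximena5745/Reforma_Curricular | pages/1_Detalle_por_Etapa.py | _av_col
-- ===== SOURCE A (Python) =====
-- def _av_col(s):
--     out = []
--     for val in s:
--         try:
--             p = int(str(val).replace("%", ""))
--             if p >= 70:   out.append("background-color:#edf7e1;color:#2d6a00;font-weight:700")
--             elif p >= 40: out.append("background-color:#EBF5FB;color:#0a5e80;font-weight:700")
--             else:         out.append("background-color:#fce8f2;color:#9a003e;font-weight:700")
--         except:
--             out.append("")
--     return out
-- ===== SOURCE B (Python) =====
-- _HI  = "background-color:#edf7e1;color:#2d6a00;font-weight:700"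
-- _MID = "background-color:#EBF5FB;color:#0a5e80;font-weight:700"
-- _LOW = "background-color:#fce8f2;color:#9a003e;font-weight:700"
--
--
-- def _parse(v):
--     try:
--         return int(str(v).replace("%", ""))
--     except Exception:
--         return None
--
--
-- def _av_col(s):
--     # Stage 1: parse every value once.  Stage 2: preallocate the output with ''
--     # and run one fill pass per half-open style band, overwriting the slots
--     # whose parsed value lies in that band.
--     ps = [_parse(v) for v in s]
--     out = [""] * len(ps)
--     for lo, hi, style in ((70, None, _HI), (40, 70, _MID), (None, 40, _LOW)):
--         for i, p in enumerate(ps):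
--             if p is not None and (lo is None or p >= lo) and (hi is None or p < hi):
--                 out[i] = style
--     return out
-- ===== Notes on version B (the rewrite author's own statement) =====
-- stated objective: alternative
-- what changed: Instead of a single pass with an if/elif/else cascade appending to a list, B parses all values in a first stage, preallocates the output filled with '', and then runs one separate fill pass per disjoint value band (>=70, 40..69, <40), overwriting the matching slots in place.
import Mathlib
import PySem

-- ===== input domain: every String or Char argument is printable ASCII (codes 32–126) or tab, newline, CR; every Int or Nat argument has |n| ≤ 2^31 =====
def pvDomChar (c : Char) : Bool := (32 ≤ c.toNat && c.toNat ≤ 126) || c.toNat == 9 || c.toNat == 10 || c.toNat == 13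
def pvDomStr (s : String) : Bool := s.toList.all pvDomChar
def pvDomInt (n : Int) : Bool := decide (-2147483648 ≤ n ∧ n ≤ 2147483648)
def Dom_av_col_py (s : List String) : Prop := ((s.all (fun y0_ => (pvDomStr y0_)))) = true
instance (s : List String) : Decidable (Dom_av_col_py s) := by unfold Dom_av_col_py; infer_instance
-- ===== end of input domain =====

-- B replaces A's single append loop with an if/elif/else cascade by a staged algorithm:
-- parse everything first, preallocate the output with "", then one fill pass per disjoint
-- value band overwriting the matching slots (alternative decomposition, same cost).

-- ===== PORT A =====
def av_col_py (s : List String) : List String :=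
  s.foldl (fun out val =>
    match PySem.Int.ofStr? (PySem.Str.replace val "%" "") with
    | some p =>
        if p ≥ 70 then out ++ ["background-color:#edf7e1;color:#2d6a00;font-weight:700"]
        else if p ≥ 40 then out ++ ["background-color:#EBF5FB;color:#0a5e80;font-weight:700"]
        else out ++ ["background-color:#fce8f2;color:#9a003e;font-weight:700"]
    | none => out ++ [""]) []

-- ===== PORT B =====
def pvHi : String := "background-color:#edf7e1;color:#2d6a00;font-weight:700"
def pvMid : String := "background-color:#EBF5FB;color:#0a5e80;font-weight:700"
def pvLow : String := "background-color:#fce8f2;color:#9a003e;font-weight:700"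

def pvParse (v : String) : Option Int := PySem.Int.ofStr? (PySem.Str.replace v "%" "")

-- one band predicate: p is not None and (lo is None or p >= lo) and (hi is None or p < hi)
def pvInBand (lo hi : Option Int) : Option Int → Bool
  | none => false
  | some p => (match lo with | none => true | some l => decide (p ≥ l))
              && (match hi with | none => true | some h => decide (p < h))

-- one fill pass: out[i] = style wherever ps[i] is in the band
def pvFill (lo hi : Option Int) (style : String) : List String → List (Option Int) → List String
  | o :: os, p :: ps => (if pvInBand lo hi p then style else o) :: pvFill lo hi style os ps
  | os, [] => os
  | [], _ => []

def av_col_py_alt (s : List String) : List String :=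
  let ps := s.map pvParse
  let out0 := List.replicate ps.length ""
  let out1 := pvFill (some 70) none pvHi out0 ps
  let out2 := pvFill (some 40) (some 70) pvMid out1 ps
  pvFill none (some 40) pvLow out2 ps

-- ===== PRECONDITION & SPEC =====
def Spec_av_col_py (s : List String) (out : List String) : Prop := out = av_col_py_alt s
instance (s : List String) (out : List String) : Decidable (Spec_av_col_py s out) := by unfold Spec_av_col_py; infer_instance

-- ===== CLAIM (what is proved, stated in full; the proofs are below) =====
def Claim_equal_av_col_py : Prop := ∀ (s : List String), Dom_av_col_py s → Spec_av_col_py s (av_col_py s)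

-- ===== LEMMAS AND PROOFS =====

-- the value A's cascade produces for one element
def pvCascade (val : String) : String :=
  match pvParse val with
  | some p => if p ≥ 70 then pvHi else if p ≥ 40 then pvMid else pvLow
  | none => ""

lemma av_col_py_eq_map (s : List String) : av_col_py s = s.map pvCascade := by
  unfold av_col_py
  have : s.foldl (fun out val =>
      match PySem.Int.ofStr? (PySem.Str.replace val "%" "") with
      | some p =>
          if p ≥ 70 then out ++ ["background-color:#edf7e1;color:#2d6a00;font-weight:700"]
          else if p ≥ 40 then out ++ ["background-color:#EBF5FB;color:#0a5e80;font-weight:700"]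
          else out ++ ["background-color:#fce8f2;color:#9a003e;font-weight:700"]
      | none => out ++ [""]) []
      = s.foldl (fun out val => out ++ [pvCascade val]) [] := by
    apply PySem.List.foldl_congr_mem
    intro out val _
    unfold pvCascade pvParse pvHi pvMid pvLow
    cases PySem.Int.ofStr? (PySem.Str.replace val "%" "") with
    | none => rfl
    | some p => by_cases h70 : p ≥ 70 <;> by_cases h40 : p ≥ 40 <;> simp [h70, h40]
  rw [this, PySem.List.foldl_append_singleton_eq_map]
  simp

lemma pv_head_eq (q : Option Int) :
    (if pvInBand none (some 40) q then pvLow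
     else if pvInBand (some 40) (some 70) q then pvMid
     else if pvInBand (some 70) none q then pvHi
     else "") =
    (match q with
     | some p => if p ≥ 70 then pvHi else if p ≥ 40 then pvMid else pvLow
     | none => "") := by
  cases q with
  | none => rfl
  | some p =>
      simp only [pvInBand, Bool.and_eq_true, Bool.true_and, Bool.and_true,
        decide_eq_true_eq]
      split_ifs <;> first | rfl | omega

set_option maxHeartbeats 2000000 in
lemma av_col_py_alt_cons (v : String) (s : List String) : av_col_py_alt (v :: s) =
    (if pvInBand none (some 40) (pvParse v) then pvLow
     else if pvInBand (some 40) (some 70) (pvParse v) then pvMid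
     else if pvInBand (some 70) none (pvParse v) then pvHi
     else "") :: av_col_py_alt s := rfl

lemma av_col_py_alt_eq_map (s : List String) : av_col_py_alt s = s.map pvCascade := by
  induction s with
  | nil => rfl
  | cons v s ih =>
      rw [av_col_py_alt_cons, ih, List.map_cons]
      have h : (if pvInBand none (some 40) (pvParse v) then pvLow
          else if pvInBand (some 40) (some 70) (pvParse v) then pvMid
          else if pvInBand (some 70) none (pvParse v) then pvHi
          else "") = pvCascade v := by
        unfold pvCascade
        generalize pvParse v = q
        exact pv_head_eq q
      rw [h]

-- ===== VERDICT (by name: the statement is the Claim_ definition above) =====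
theorem av_col_py_spec : Claim_equal_av_col_py := by
  intro s _
  show av_col_py s = av_col_py_alt s
  rw [av_col_py_eq_map, av_col_py_alt_eq_map]
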